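-- pv_equiv track=rewrite | github.com/Shivam-baghel/Python_Scaler | 2.Data_Structures_and_Algorithm/2.Advance/28.Queues_1/Assignment/Q1.Perfect_Numbers.py | find_Ath_PerfectNumber
-- ===== SOURCE A (Python) =====
-- from collections import deque
--
-- def find_Ath_PerfectNumber(number:int):
--     """This is function to return Ath perfect Number. The persfect Number is explained in above question.
--
--     Args:
--         number (Integer): Accepts the number in Integer.
--
--     Returns:
--         String:  The string that denotes Ath perfect Number
--     """
--
--     queue = deque()
--     queue.append('1')
--     queue.append('2')
--     # n = 1<<number
--     for i in range(number):
--         element = queue[i]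
--
--         queue.append(element+'1')
--         queue.append(element+'2')
--
--
--     count = 0
--     # for i in range(len(queue)):
--     #     length = len(queue[i])
--
--     # if length % 2 == 0 and isPalindrome(queue[i]):
--     #         count +=1
--
--     #         if count == number:
--     #             return queue[i]
--
--     """Explained in hint"""
--
--     string = queue[number-1]
--     rev = ''.join(reversed(string))
--
--     return string+rev
-- ===== SOURCE B (Python) =====
-- def find_Ath_PerfectNumber(number: int):
--     """Ath perfect number: bijective base-2 numeral of `number` over digits
--     {1,2}, followed by its reverse.  Computed digit by digit in O(log number)
--     instead of materialising the whole BFS queue."""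
--     digits = []
--     n = number
--     while n > 0:
--         if n % 2 == 1:
--             digits.append('1')
--             n = n // 2
--         else:
--             digits.append('2')
--             n = n // 2 - 1
--     s = ''.join(reversed(digits))
--     return s + s[::-1]
-- ===== Notes on version B (the rewrite author's own statement) =====
-- stated objective: faster
-- what changed: Instead of materialising a BFS queue of 2+2*number strings and indexing into it, B computes the bijective base-2 numeral of `number` digit by digit and appends its reverse.
-- intended difference: For number in {-1, 0} A's negative queue index wraps around and accidentally returns '11' resp. '22'; B's digit loop never runs and returns the empty string, the natural value since there is no Ath perfect number for number <= 0. — e.g. on find_Ath_PerfectNumber(0): A returns "22", B returns ""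
import Mathlib
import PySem

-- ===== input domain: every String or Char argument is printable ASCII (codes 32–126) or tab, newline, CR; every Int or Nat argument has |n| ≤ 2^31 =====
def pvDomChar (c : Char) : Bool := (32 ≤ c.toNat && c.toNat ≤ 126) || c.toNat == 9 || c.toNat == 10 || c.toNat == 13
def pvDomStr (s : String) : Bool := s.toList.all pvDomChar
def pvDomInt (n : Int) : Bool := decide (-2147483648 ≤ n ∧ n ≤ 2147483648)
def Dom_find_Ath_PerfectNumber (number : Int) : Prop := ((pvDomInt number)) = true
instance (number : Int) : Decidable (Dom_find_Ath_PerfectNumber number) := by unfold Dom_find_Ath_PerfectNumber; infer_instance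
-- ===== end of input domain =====

-- B replaces A's BFS queue of 2+2*number strings by a direct digit-by-digit computation
-- of the bijective base-2 numeral of `number` over digits {1,2}, then appends its reverse.


-- ===== PORT A =====
-- the deque is a List String; queue[i] / queue[number-1] are pyGet?
-- (none = IndexError, excluded by Pre_; the .getD "" default is unreachable inside Pre_).
def find_Ath_PerfectNumber (number : Int) : String :=
  let queue : List String := ["1", "2"]
  let queue := (PySem.List.pyRange 0 number 1).foldl
    (fun q i =>
      let element := (PySem.List.pyGet? q i).getD ""
      (q ++ [element ++ "1"]) ++ [element ++ "2"]) queue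
  let string := (PySem.List.pyGet? queue (number - 1)).getD ""
  let rev := String.ofList string.toList.reverse
  string ++ rev

-- ===== PORT B =====
-- the while loop of Source B: appends the least-significant digit of n to `acc` each round
def pvBijDigits (n : Int) (acc : List Char) : List Char :=
  if _h : 0 < n then
    if PySem.Int.mod n 2 = 1 then
      pvBijDigits (PySem.Int.floordiv n 2) (acc ++ ['1'])
    else
      pvBijDigits (PySem.Int.floordiv n 2 - 1) (acc ++ ['2'])
  else acc
termination_by n.toNat
decreasing_by
  · rw [PySem.Int.floordiv_eq_ediv_of_pos (by omega)]; omega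
  · rw [PySem.Int.floordiv_eq_ediv_of_pos (by omega)]; omega

def find_Ath_PerfectNumber_alt (number : Int) : String :=
  let s := String.ofList (pvBijDigits number []).reverse
  s ++ String.ofList s.toList.reverse

-- ===== PRECONDITION & SPEC =====
-- A raises IndexError for number ≤ -2 (queue index number-1 out of range); excluded here.
def Pre_find_Ath_PerfectNumber (number : Int) : Prop := -1 ≤ number
instance (number : Int) : Decidable (Pre_find_Ath_PerfectNumber number) := by
  unfold Pre_find_Ath_PerfectNumber; infer_instance
def pvWitness_find_Ath_PerfectNumber : Int := 3

-- For number in {-1, 0} A's negative queue index wraps around and accidentally returns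
-- '11' resp. '22'; B's digit loop never runs and returns "", the natural value since
-- there is no Ath perfect number for number ≤ 0.
def D_find_Ath_PerfectNumber (number : Int) : Prop := number ≤ 0
instance (number : Int) : Decidable (D_find_Ath_PerfectNumber number) := by
  unfold D_find_Ath_PerfectNumber; infer_instance

def Spec_find_Ath_PerfectNumber (number : Int) (out : String) : Prop :=
  ¬ D_find_Ath_PerfectNumber number → out = find_Ath_PerfectNumber_alt number
instance (number : Int) (out : String) : Decidable (Spec_find_Ath_PerfectNumber number out) := by
  unfold Spec_find_Ath_PerfectNumber; infer_instance

def pvDiffWitness_find_Ath_PerfectNumber : Int := 0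
def pvDiffWitnessOut_find_Ath_PerfectNumber : String × String := ("22", "")

-- ===== CLAIM =====
def Claim_unchanged_find_Ath_PerfectNumber : Prop := ∀ (number : Int), Dom_find_Ath_PerfectNumber number → Pre_find_Ath_PerfectNumber number → Spec_find_Ath_PerfectNumber number (find_Ath_PerfectNumber number)
def Claim_changed_find_Ath_PerfectNumber : Prop := Dom_find_Ath_PerfectNumber (pvDiffWitness_find_Ath_PerfectNumber) ∧ Pre_find_Ath_PerfectNumber (pvDiffWitness_find_Ath_PerfectNumber) ∧ D_find_Ath_PerfectNumber (pvDiffWitness_find_Ath_PerfectNumber) ∧ find_Ath_PerfectNumber (pvDiffWitness_find_Ath_PerfectNumber) = pvDiffWitnessOut_find_Ath_PerfectNumber.1 ∧ find_Ath_PerfectNumber_alt (pvDiffWitness_find_Ath_PerfectNumber) = pvDiffWitnessOut_find_Ath_PerfectNumber.2 ∧ pvDiffWitnessOut_find_Ath_PerfectNumber.1 ≠ pvDiffWitnessOut_find_Ath_PerfectNumber.2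
def Claim_exact_find_Ath_PerfectNumber : Prop := ∀ (number : Int), Dom_find_Ath_PerfectNumber number → Pre_find_Ath_PerfectNumber number → D_find_Ath_PerfectNumber number → find_Ath_PerfectNumber number ≠ find_Ath_PerfectNumber_alt number

-- ===== LEMMAS AND PROOFS =====

theorem pvBijDigits_nonpos (n : Int) (acc : List Char) (h : n ≤ 0) : pvBijDigits n acc = acc := by
  rw [pvBijDigits, dif_neg (by omega)]

theorem pvBijDigits_acc_aux : ∀ (k : Nat) (n : Int), n.toNat ≤ k → ∀ acc,
    pvBijDigits n acc = acc ++ pvBijDigits n [] := by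
  intro k
  induction k with
  | zero =>
    intro n hn acc
    rw [pvBijDigits_nonpos n acc (by omega), pvBijDigits_nonpos n [] (by omega)]
    simp
  | succ k ih =>
    intro n hn acc
    by_cases hp : 0 < n
    · have h2 : PySem.Int.floordiv n 2 = n / 2 := PySem.Int.floordiv_eq_ediv_of_pos (by omega)
      conv_lhs => rw [pvBijDigits]
      conv_rhs => rw [pvBijDigits]
      rw [dif_pos hp, dif_pos hp]
      by_cases hm : PySem.Int.mod n 2 = 1
      · simp only [if_pos hm]
        rw [ih (PySem.Int.floordiv n 2) (by rw [h2]; omega) (acc ++ ['1']),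
            ih (PySem.Int.floordiv n 2) (by rw [h2]; omega) ([] ++ ['1'])]
        simp
      · simp only [if_neg hm]
        rw [ih (PySem.Int.floordiv n 2 - 1) (by rw [h2]; omega) (acc ++ ['2']),
            ih (PySem.Int.floordiv n 2 - 1) (by rw [h2]; omega) ([] ++ ['2'])]
        simp
    · rw [pvBijDigits_nonpos n acc (by omega), pvBijDigits_nonpos n [] (by omega)]
      simp

theorem pvBijDigits_acc (n : Int) (acc : List Char) :
    pvBijDigits n acc = acc ++ pvBijDigits n [] :=
  pvBijDigits_acc_aux n.toNat n le_rfl acc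

theorem pvBijDigits_odd (m : Int) (hm : 0 ≤ m) :
    pvBijDigits (2*m+1) [] = '1' :: pvBijDigits m [] := by
  have hmod : PySem.Int.mod (2*m+1) 2 = 1 := by
    rw [PySem.Int.mod_eq_emod_of_pos (by omega)]; omega
  have hdiv : PySem.Int.floordiv (2*m+1) 2 = m := by
    rw [PySem.Int.floordiv_eq_ediv_of_pos (by omega)]; omega
  rw [pvBijDigits, dif_pos (by omega), if_pos hmod, hdiv, pvBijDigits_acc]
  simp

theorem pvBijDigits_even (m : Int) (hm : 0 ≤ m) :
    pvBijDigits (2*m+2) [] = '2' :: pvBijDigits m [] := by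
  have hmod : ¬ PySem.Int.mod (2*m+2) 2 = 1 := by
    rw [PySem.Int.mod_eq_emod_of_pos (by omega)]; omega
  have hdiv : PySem.Int.floordiv (2*m+2) 2 - 1 = m := by
    rw [PySem.Int.floordiv_eq_ediv_of_pos (by omega)]; omega
  rw [pvBijDigits, dif_pos (by omega), if_neg hmod, hdiv, pvBijDigits_acc]
  simp

-- the string at queue position k-1 (1-based index k), proof-only abbreviation
def pvF (k : Nat) : String := String.ofList (pvBijDigits (k : Int) []).reverse

theorem pvF_one : pvF 1 = "1" := by
  have h := pvBijDigits_odd 0 le_rfl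
  rw [pvBijDigits_nonpos 0 [] le_rfl] at h
  norm_num at h
  unfold pvF
  norm_num [h]

theorem pvF_two : pvF 2 = "2" := by
  have h := pvBijDigits_even 0 le_rfl
  rw [pvBijDigits_nonpos 0 [] le_rfl] at h
  norm_num at h
  unfold pvF
  norm_num [h]

theorem pvF_odd (j : Nat) : pvF (2*j+3) = pvF (j+1) ++ "1" := by
  unfold pvF
  have hcast : ((2*j+3 : Nat) : Int) = 2*((j+1 : Nat) : Int)+1 := by push_cast; ring
  rw [hcast, pvBijDigits_odd _ (by positivity)]
  simp

theorem pvF_even (j : Nat) : pvF (2*j+4) = pvF (j+1) ++ "2" := by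
  unfold pvF
  have hcast : ((2*j+4 : Nat) : Int) = 2*((j+1 : Nat) : Int)+2 := by push_cast; ring
  rw [hcast, pvBijDigits_even _ (by positivity)]
  simp

theorem pvLoopInv (j : Nat) :
    (PySem.List.pyRange 0 (j : Int) 1).foldl
      (fun q i =>
        let element := (PySem.List.pyGet? q i).getD ""
        (q ++ [element ++ "1"]) ++ [element ++ "2"]) ["1", "2"]
    = (List.range (2+2*j)).map (fun k => pvF (k+1)) := by
  induction j with
  | zero =>
    rw [show ((0:Nat):Int) = 0 from rfl, PySem.List.pyRange_one_eq_nil le_rfl]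
    simp [List.range_succ, pvF_one, pvF_two]
  | succ j ih =>
    rw [show ((j+1 : Nat) : Int) = (j : Int) + 1 by push_cast; ring,
        PySem.List.pyRange_one_succ_right (by omega), List.foldl_append, ih]
    simp only [List.foldl_cons, List.foldl_nil]
    have hget : (PySem.List.pyGet? ((List.range (2+2*j)).map (fun k => pvF (k+1))) (j : Int)).getD ""
        = pvF (j+1) := by
      simp [PySem.List.pyGet?_natCast, List.getElem?_map]
      rw [List.getElem?_range (by omega)]
      rfl
    rw [hget]
    rw [show 2+2*(j+1) = ((2+2*j)+1)+1 by ring, List.range_succ, List.range_succ]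
    simp
    constructor
    · rw [show (2+2*j)+1 = 2*j+3 by ring, pvF_odd]
    · rw [show (2+2*j)+1+1 = 2*j+4 by ring, pvF_even]

-- ===== VERDICT =====
theorem find_Ath_PerfectNumber_spec : Claim_unchanged_find_Ath_PerfectNumber := by
  intro number _ hpre hD
  unfold Pre_find_Ath_PerfectNumber at hpre
  unfold D_find_Ath_PerfectNumber at hD
  have hn : 1 ≤ number := by omega
  have hcast : number = ((number.toNat : Nat) : Int) := by omega
  simp only [find_Ath_PerfectNumber, find_Ath_PerfectNumber_alt]
  rw [hcast, pvLoopInv number.toNat]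
  have hidx : ((number.toNat : Nat) : Int) - 1 = ((number.toNat - 1 : Nat) : Int) := by omega
  have hget : (PySem.List.pyGet? ((List.range (2+2*number.toNat)).map (fun k => pvF (k+1)))
      (((number.toNat : Nat) : Int) - 1)).getD "" = pvF number.toNat := by
    rw [hidx]
    simp only [PySem.List.pyGet?_natCast, List.getElem?_map]
    rw [List.getElem?_range (by omega)]
    simp only [Option.map_some, Option.getD_some]
    congr 1
    omega
  rw [hget]
  rfl

theorem find_Ath_PerfectNumber_changed : Claim_changed_find_Ath_PerfectNumber := by
  unfold Claim_changed_find_Ath_PerfectNumber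
  refine ⟨by decide, by decide, by decide, by decide, ?_, by decide⟩
  simp [find_Ath_PerfectNumber_alt, pvDiffWitness_find_Ath_PerfectNumber,
    pvDiffWitnessOut_find_Ath_PerfectNumber, pvBijDigits_nonpos]

theorem find_Ath_PerfectNumber_tight : Claim_exact_find_Ath_PerfectNumber := by
  intro number _ hpre hD
  unfold Pre_find_Ath_PerfectNumber at hpre
  unfold D_find_Ath_PerfectNumber at hD
  have halt : find_Ath_PerfectNumber_alt number = "" := by
    simp only [find_Ath_PerfectNumber_alt]
    rw [pvBijDigits_nonpos number [] hD]
    decide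
  rw [halt]
  have h2 : number = -1 ∨ number = 0 := by omega
  rcases h2 with h | h <;> subst h <;> decide
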